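-- pv_equiv track=rewrite | github.com/pipickeke/python | src/com.pipickeke/year2025/month10/week1/3333. 找到初始输入字符串 II.py | possibleStringCount_2
-- ===== SOURCE A (Python) =====
-- from itertools import accumulate
--
-- def possibleStringCount_2(word:str, k:int)->int:
--     n = len(word)
--     if n < k:
--         return 0
--
--     cnts = []
--     cnt = 0
--     ans = 1
--     MOD = int(1e9 + 7)
--     for i in range(n):
--         cnt += 1
--         if i == n-1 or word[i] != word[i+1]:
--             if cnt > 1:
--                 if k > 0:
--                     cnts.append(cnt-1)
--                 ans = ans * cnt % MOD
--
--             k -= 1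
--             cnt = 0
--
--     if k <= 0:
--         return ans
--
--     f = [[0] * k for _ in range(len(cnts)+1)]
--     f[0] = [1] * k
--     for i, c in enumerate(cnts):
--         s = list(accumulate(f[i], initial=0))
--         for j in range(k):
--             f[i+1][j] = (s[j+1] - s[max(j-c, 0)]) % MOD
--
--
--     return (ans - f[-1][-1]) % MOD
-- ===== SOURCE B (Python) =====
-- def possibleStringCount_2(word: str, k: int) -> int:
--     n = len(word)
--     if n < k:
--         return 0
--
--     cnts = []
--     cnt = 0
--     ans = 1
--     MOD = int(1e9 + 7)
--     for i in range(n):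
--         cnt += 1
--         if i == n - 1 or word[i] != word[i + 1]:
--             if cnt > 1:
--                 if k > 0:
--                     cnts.append(cnt - 1)
--                 ans = ans * cnt % MOD
--             k -= 1
--             cnt = 0
--
--     if k <= 0:
--         return ans
--
--     # Kernel: the number of too-short strings equals the sum of the
--     # coefficients below x^k of prod_i (1 + x + ... + x^{c_i}), computed by a
--     # divide-and-conquer product of run polynomials with naive truncated
--     # convolution (no DP table, no prefix sums).
--     poly = _prod(cnts, k, MOD)
--     return (ans - sum(poly) % MOD) % MOD
--
--
-- def _mul(p, q, k, MOD):
--     m = min(len(p) + len(q) - 1, k)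
--     return [sum(p[i] * q[j - i] for i in range(j + 1)
--                 if i < len(p) and j - i < len(q)) % MOD
--             for j in range(m)]
--
--
-- def _prod(cnts, k, MOD):
--     if len(cnts) <= 1:
--         return [1] if not cnts else [1] * min(cnts[0] + 1, k)
--     m = len(cnts) // 2
--     return _mul(_prod(cnts[:m], k, MOD), _prod(cnts[m:], k, MOD), k, MOD)
-- ===== Notes on version B (the rewrite author's own statement) =====
-- stated objective: alternative
-- what changed: Replaces A's row-by-row cumulative DP table (itertools.accumulate prefix sums, answer read from f[-1][-1]) by a divide-and-conquer product of the run polynomials 1+x+...+x^c under naive truncated convolution, the too-short count being the coefficient sum of the product polynomial.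
import Mathlib
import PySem

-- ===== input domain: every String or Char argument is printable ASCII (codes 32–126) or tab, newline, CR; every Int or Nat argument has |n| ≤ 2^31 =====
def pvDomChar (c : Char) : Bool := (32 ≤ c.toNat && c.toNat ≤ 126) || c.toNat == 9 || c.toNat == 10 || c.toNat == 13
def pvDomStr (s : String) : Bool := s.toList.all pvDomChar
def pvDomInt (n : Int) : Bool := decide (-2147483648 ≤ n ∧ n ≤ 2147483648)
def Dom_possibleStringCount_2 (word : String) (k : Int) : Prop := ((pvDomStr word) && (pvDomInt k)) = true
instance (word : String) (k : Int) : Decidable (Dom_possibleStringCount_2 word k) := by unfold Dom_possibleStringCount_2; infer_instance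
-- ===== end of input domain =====

-- B replaces A's cumulative DP table (accumulate prefix sums, answer f[-1][-1]) by a
-- divide-and-conquer product of the run polynomials 1+x+...+x^c under naive truncated
-- convolution, summing the coefficients of the product (alternative algorithm, same
-- group-building prefix).

-- ===== PORT A =====
-- Shared group-building loop body: one step of `for i in range(n)` over state (cnts, cnt, ans, k).
-- Both Python versions contain this loop verbatim.  Indices i, i+1 are read only in range
-- (short-circuit `i == n-1 or ...`), so getD's default is never produced.
def pvGroupStep (w : List Char) (st : List Int × Int × Int × Int) (i : Nat) :
    List Int × Int × Int × Int :=
  let cnts := st.1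
  let cnt := st.2.1 + 1                     -- cnt += 1
  let ans := st.2.2.1
  let kk := st.2.2.2
  if i = w.length - 1 ∨ w.getD i ' ' ≠ w.getD (i + 1) ' ' then
    ((if 1 < cnt ∧ 0 < kk then cnts ++ [cnt - 1] else cnts), 0,
     (if 1 < cnt then PySem.Int.mod (ans * cnt) 1000000007 else ans), kk - 1)
  else (cnts, cnt, ans, kk)

-- itertools.accumulate(row, initial=0): the K+1 prefix sums of row
def pvPrefixSums (row : List Int) : List Int :=
  (List.range (row.length + 1)).map (fun i => (row.take i).sum)

-- A's DP step: next row from f[i] (Python writes it into the pre-allocated zero row f[i+1])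
def pvStepA (K : Nat) (row : List Int) (c : Int) : List Int :=
  -- Python binds s = accumulate(f[i], initial=0) once; written inline here
  (List.range K).map (fun (j : Nat) =>
    PySem.Int.mod ((pvPrefixSums row).getD (j + 1) 0
      - (pvPrefixSums row).getD (max ((j : Int) - c) 0).toNat 0) 1000000007)

def possibleStringCount_2 (word : String) (k : Int) : Int :=
  let w := word.toList
  if (w.length : Int) < k then 0
  else
    let st := (List.range w.length).foldl (pvGroupStep w) ([], 0, 1, k)
    let cnts := st.1
    let ans := st.2.2.1
    let kk := st.2.2.2
    if kk ≤ 0 then ans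
    else
      let K := kk.toNat
      let fin := cnts.foldl (pvStepA K) (List.replicate K 1)
      PySem.Int.mod (ans - fin.getD (K - 1) 0) 1000000007    -- f[-1][-1], length K ≥ 1

-- ===== PORT B =====
-- _mul(p, q, k, MOD): naive convolution truncated below x^k, entry by entry
def pvMul (k : Nat) (p q : List Int) : List Int :=
  (List.range (min (p.length + q.length - 1) k)).map (fun (j : Nat) =>
    PySem.Int.mod ((List.range (j + 1)).foldl (fun (s : Int) (i : Nat) =>
      if i < p.length ∧ j - i < q.length then s + p.getD i 0 * q.getD (j - i) 0 else s) 0)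
      1000000007)

-- _prod(cnts, k, MOD): divide-and-conquer product of the run polynomials 1+x+...+x^c
def pvProd (k : Nat) (cnts : List Int) : List Int :=
  if cnts.length ≤ 1 then
    match cnts with
    | [] => [1]
    | c :: _ => List.replicate (min (c + 1) (k : Int)).toNat 1    -- [1]*min(c+1, k)
  else
    pvMul k (pvProd k (cnts.take (cnts.length / 2))) (pvProd k (cnts.drop (cnts.length / 2)))
termination_by cnts.length
decreasing_by
  · simp only [List.length_take]; omega
  · simp only [List.length_drop]; omega

def possibleStringCount_2_alt (word : String) (k : Int) : Int :=
  let w := word.toList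
  if (w.length : Int) < k then 0
  else
    let st := (List.range w.length).foldl (pvGroupStep w) ([], 0, 1, k)
    let cnts := st.1
    let ans := st.2.2.1
    let kk := st.2.2.2
    if kk ≤ 0 then ans
    else
      let poly := pvProd kk.toNat cnts
      PySem.Int.mod (ans - PySem.Int.mod poly.sum 1000000007) 1000000007

-- ===== PRECONDITION & SPEC =====
def Spec_possibleStringCount_2 (word : String) (k : Int) (out : Int) : Prop := out = possibleStringCount_2_alt word k
instance (word : String) (k : Int) (out : Int) : Decidable (Spec_possibleStringCount_2 word k out) := by unfold Spec_possibleStringCount_2; infer_instance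

-- ===== CLAIM (what is proved, stated in full; the proofs are below) =====
def Claim_equal_possibleStringCount_2 : Prop := ∀ (word : String) (k : Int), Dom_possibleStringCount_2 word k → Spec_possibleStringCount_2 word k (possibleStringCount_2 word k)

-- ===== LEMMAS AND PROOFS =====

lemma pymod_eq (x : Int) : PySem.Int.mod x 1000000007 = x % 1000000007 :=
  PySem.Int.mod_eq_emod_of_pos (by norm_num)

-- (l.take i).sum as a range sum of getD (holds for every i: out-of-range getD's are 0)
lemma take_sum_eq (l : List Int) : ∀ i : ℕ, (l.take i).sum = ∑ p ∈ Finset.range i, l.getD p 0 := by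
  induction l with
  | nil => intro i; simp
  | cons x t ih =>
    intro i
    cases i with
    | zero => simp
    | succ j =>
      rw [List.take_succ_cons, List.sum_cons, Finset.sum_range_succ']
      simp [ih j]
      ring

lemma list_sum_eq (l : List Int) : l.sum = ∑ p ∈ Finset.range l.length, l.getD p 0 := by
  simpa using take_sum_eq l l.length

-- the double-counting identity behind "cumulative row = prefix sums of exact row"
lemma swapWindow (G : ℕ → ℤ) (cn j : ℕ) :
    ∑ p ∈ Finset.Ico (j - cn) (j + 1), ∑ r ∈ Finset.range (p + 1), G r
      = ∑ r ∈ Finset.range (j + 1), ∑ q ∈ Finset.Ico (r - cn) (r + 1), G q := by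
  have hL : ∀ p ∈ Finset.Ico (j - cn) (j + 1),
      (∑ r ∈ Finset.range (p + 1), G r)
        = ∑ r ∈ Finset.range (j + 1), if r < p + 1 then G r else 0 := by
    intro p hp
    rw [← Finset.sum_filter]
    congr 1
    ext x
    simp only [Finset.mem_Ico, Finset.mem_range, Finset.mem_filter] at *
    omega
  have hR : ∀ r ∈ Finset.range (j + 1),
      (∑ q ∈ Finset.Ico (r - cn) (r + 1), G q)
        = ∑ q ∈ Finset.range (j + 1), if r - cn ≤ q ∧ q < r + 1 then G q else 0 := by
    intro r hr
    rw [← Finset.sum_filter]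
    congr 1
    ext x
    simp only [Finset.mem_Ico, Finset.mem_range, Finset.mem_filter] at *
    omega
  rw [Finset.sum_congr rfl hL, Finset.sum_congr rfl hR, Finset.sum_comm]
  conv_rhs => rw [Finset.sum_comm]
  apply Finset.sum_congr rfl
  intro r hr
  have h1 : (Finset.Ico (j - cn) (j + 1)).filter (fun p => r < p + 1)
      = Finset.Ico (max (j - cn) r) (j + 1) := by
    ext x
    simp only [Finset.mem_Ico, Finset.mem_filter]
    omega
  have h2 : (Finset.range (j + 1)).filter (fun x => x - cn ≤ r ∧ r < x + 1)
      = Finset.Ico r (min (r + cn) j + 1) := by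
    ext x
    simp only [Finset.mem_Ico, Finset.mem_range, Finset.mem_filter]
    omega
  rw [← Finset.sum_filter, ← Finset.sum_filter, h1, h2,
    Finset.sum_const, Finset.sum_const, Nat.card_Ico, Nat.card_Ico]
  have hr' : r < j + 1 := Finset.mem_range.mp hr
  congr 1
  omega

-- invariant of the group-building loop: every stored group bonus is ≥ 1, cnt stays ≥ 0
lemma pvGroupInv (w : List Char) (l : List Nat) :
    ∀ st : List Int × Int × Int × Int, (∀ c ∈ st.1, 1 ≤ c) → 0 ≤ st.2.1 →
      (∀ c ∈ (l.foldl (pvGroupStep w) st).1, 1 ≤ c) := by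
  induction l with
  | nil => intro st h1 _; simpa using h1
  | cons i t ih =>
    intro st h1 h2
    rw [List.foldl_cons]
    apply ih
    · unfold pvGroupStep
      split
      · intro c hc
        simp only at hc
        split at hc
        · rcases List.mem_append.mp hc with h | h
          · exact h1 c h
          · simp only [List.mem_singleton] at h
            omega
        · exact h1 c hc
      · exact h1
    · unfold pvGroupStep
      split
      · simp
      · simpa using by omega

-- reference exact row: g'[j] = (sum of g over the window [j-c, j]) mod M — the exact
-- counts whose prefix sums A's cumulative rows store
def pvW (g : List Int) (cn r : Nat) : Int :=
  (∑ q ∈ Finset.Ico (r - cn) (r + 1), g.getD q 0) % 1000000007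

def pvRef (K : Nat) (g : List Int) (c : Int) : List Int :=
  (List.range K).map (pvW g c.toNat)

-- DP invariant: A's row entries are the mod-M prefix sums of the exact reference row
def pvInv (K : Nat) (row g : List Int) : Prop :=
  row.length = K ∧ g.length = K ∧
    ∀ j < K, row.getD j 0 = (∑ r ∈ Finset.range (j + 1), g.getD r 0) % 1000000007

lemma pvStepA_getD (K : Nat) (row : List Int) (c : Int) (j : Nat) (hj : j < K)
    (hrow : row.length = K) (hc : 1 ≤ c) :
    (pvStepA K row c).getD j 0
      = (∑ p ∈ Finset.Ico (j - c.toNat) (j + 1), row.getD p 0) % 1000000007 := by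
  unfold pvStepA pvPrefixSums
  rw [PySem.List.getD_map_range _ _ _ _ hj, pymod_eq]
  have ha : (max ((j : Int) - c) 0).toNat = j - c.toNat := by omega
  have hb1 : j + 1 < row.length + 1 := by omega
  have hb2 : j - c.toNat < row.length + 1 := by omega
  rw [ha, PySem.List.getD_map_range _ _ _ _ hb1, PySem.List.getD_map_range _ _ _ _ hb2,
    take_sum_eq, take_sum_eq, eq_comm]
  congr 1
  exact Finset.sum_Ico_eq_sub _ (by omega)

lemma pvStepInv (K : Nat) (c : Int) (hc : 1 ≤ c) (row g : List Int)
    (h : pvInv K row g) : pvInv K (pvStepA K row c) (pvRef K g c) := by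
  obtain ⟨hrow, hg, hinv⟩ := h
  refine ⟨by simp [pvStepA], by simp [pvRef], ?_⟩
  intro j hj
  rw [pvStepA_getD K row c j hj hrow hc]
  have hstep : ∀ p ∈ Finset.Ico (j - c.toNat) (j + 1),
      row.getD p 0 = (∑ r ∈ Finset.range (p + 1), g.getD r 0) % 1000000007 := by
    intro p hp
    have : p < K := by
      have := Finset.mem_Ico.mp hp
      omega
    exact hinv p this
  rw [Finset.sum_congr rfl hstep, ← Finset.sum_int_mod, swapWindow, Finset.sum_int_mod]
  congr 1
  apply Finset.sum_congr rfl
  intro r hr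
  rw [pvRef,
    PySem.List.getD_map_range _ _ _ _ (by have := Finset.mem_range.mp hr; omega : r < K)]
  rfl

lemma pvFoldInv (K : Nat) : ∀ (cnts : List Int) (row g : List Int),
    (∀ c ∈ cnts, 1 ≤ c) → pvInv K row g →
    pvInv K (cnts.foldl (pvStepA K) row) (cnts.foldl (pvRef K) g) := by
  intro cnts
  induction cnts with
  | nil => intro row g _ h; simpa
  | cons c t ih =>
    intro row g hc h
    rw [List.foldl_cons, List.foldl_cons]
    exact ih _ _ (fun x hx => hc x (List.mem_cons_of_mem _ hx))
      (pvStepInv K c (hc c (List.mem_cons_self)) row g h)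

lemma pvBaseInv (K : Nat) (hK : 1 ≤ K) :
    pvInv K (List.replicate K 1) (1 :: List.replicate (K - 1) 0) := by
  refine ⟨by simp, by simp; omega, ?_⟩
  intro j hj
  rw [List.getD_replicate]
  · rw [Finset.sum_range_succ']
    have hz : ∀ x ∈ Finset.range j, (1 :: List.replicate (K - 1) (0 : Int)).getD (x + 1) 0 = 0 := by
      intro x _
      show (List.replicate (K - 1) (0 : Int)).getD x 0 = 0
      rcases lt_or_ge x (K - 1) with h | h
      · rw [List.getD_replicate]
        · omega
      · rw [List.getD_eq_default]
        simpa using h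
    rw [Finset.sum_congr rfl hz]
    simp
  · omega

-- ===== polynomial semantics over ZMod 1000000007 =====

def toCoeff (p : List Int) (j : Nat) : ZMod 1000000007 := ((p.getD j 0 : Int) : ZMod 1000000007)

noncomputable def fullOnes (c : Int) : Polynomial (ZMod 1000000007) :=
  ∑ t ∈ Finset.range (c.toNat + 1), Polynomial.X ^ t

noncomputable def prodP (cnts : List Int) : Polynomial (ZMod 1000000007) := (cnts.map fullOnes).prod

lemma coeff_fullOnes (c : Int) (j : Nat) :
    (fullOnes c).coeff j = if j ≤ c.toNat then 1 else 0 := by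
  unfold fullOnes
  rw [Polynomial.finset_sum_coeff]
  simp only [Polynomial.coeff_X_pow]
  rw [Finset.sum_ite_eq (Finset.range (c.toNat + 1)) j (fun _ => (1 : ZMod 1000000007))]
  simp only [Finset.mem_range]
  split <;> split <;> first | rfl | omega

lemma cast_mod (x : Int) : ((x % 1000000007 : Int) : ZMod 1000000007) = (x : ZMod 1000000007) := by
  have : ((1000000007 : ℕ) : ℤ) = 1000000007 := by norm_num
  rw [← this, ZMod.intCast_mod]

-- the guarded inner fold of pvMul is the plain convolution sum (out-of-range getD's are 0)
lemma pvMul_inner (p q : List Int) (j : Nat) : ∀ n : Nat,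
    (List.range n).foldl (fun (s : Int) (i : Nat) =>
      if i < p.length ∧ j - i < q.length then s + p.getD i 0 * q.getD (j - i) 0 else s) 0
      = ∑ i ∈ Finset.range n, p.getD i 0 * q.getD (j - i) 0 := by
  intro n
  induction n with
  | zero => simp
  | succ m ih =>
    rw [List.range_succ, List.foldl_append, ih, List.foldl_cons, List.foldl_nil,
      Finset.sum_range_succ]
    split
    · rfl
    · rename_i h
      rw [not_and_or, not_lt, not_lt] at h
      rcases h with h | h
      · rw [List.getD_eq_default _ _ h]; ring
      · rw [List.getD_eq_default _ _ h]; ring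

lemma pvMul_length (k : Nat) (p q : List Int) :
    (pvMul k p q).length = min (p.length + q.length - 1) k := by
  simp [pvMul]

lemma pvMul_getD (k : Nat) (p q : List Int) (j : Nat)
    (hj : j < min (p.length + q.length - 1) k) :
    (pvMul k p q).getD j 0
      = (∑ i ∈ Finset.range (j + 1), p.getD i 0 * q.getD (j - i) 0) % 1000000007 := by
  unfold pvMul
  rw [PySem.List.getD_map_range _ _ _ _ hj, pymod_eq, pvMul_inner]

-- main invariant of the divide-and-conquer product
lemma pvProd_props (k : Nat) (hk : 1 ≤ k) : ∀ (n : Nat) (cnts : List Int),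
    cnts.length = n → (∀ c ∈ cnts, 1 ≤ c) →
    (1 ≤ (pvProd k cnts).length ∧ (pvProd k cnts).length ≤ k) ∧
    (∀ e ∈ pvProd k cnts, 0 ≤ e ∧ e < 1000000007) ∧
    (∀ j < k, toCoeff (pvProd k cnts) j = (prodP cnts).coeff j) := by
  intro n
  induction n using Nat.strong_induction_on with
  | _ n ih =>
    intro cnts hlen hc
    rw [pvProd.eq_def]
    by_cases hsmall : cnts.length ≤ 1
    · rw [if_pos hsmall]
      cases cnts with
      | nil =>
        dsimp only
        refine ⟨⟨by simp, by simp only [List.length_cons, List.length_nil]; omega⟩, ?_, ?_⟩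
        · intro e he
          simp only [List.mem_singleton] at he
          subst he
          norm_num
        intro j hj
        unfold toCoeff prodP
        simp only [List.map_nil, List.prod_nil, Polynomial.coeff_one]
        cases j with
        | zero => simp
        | succ m => simp
      | cons c t =>
        have hc1 : 1 ≤ c := hc c (List.mem_cons_self)
        have ht : t = [] := by
          cases t with
          | nil => rfl
          | cons _ _ => simp at hsmall
        subst ht
        dsimp only
        have hmin : (min (c + 1) (k : Int)).toNat = min (c.toNat + 1) k := by omega
        rw [hmin]
        refine ⟨⟨by simp; omega, by simp⟩, ?_, ?_⟩
        · intro e he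
          have := List.eq_of_mem_replicate he
          subst this
          norm_num
        · intro j hj
          unfold toCoeff prodP
          simp only [List.map_cons, List.map_nil, List.prod_cons, List.prod_nil, mul_one]
          rw [coeff_fullOnes]
          by_cases hjc : j < min (c.toNat + 1) k
          · rw [List.getD_replicate _ hjc, if_pos (by omega)]
            norm_num
          · rw [List.getD_eq_default _ _ (by simp only [List.length_replicate]; omega), if_neg (by omega)]
            norm_num
    · rw [if_neg hsmall]
      have hlen2 : 2 ≤ cnts.length := by omega
      have hL := ih (cnts.take (cnts.length / 2)).length
        (by simp [List.length_take]; omega) _ rfl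
        (fun x hx => hc x (List.take_subset _ _ hx))
      have hR := ih (cnts.drop (cnts.length / 2)).length
        (by simp [List.length_drop]; omega) _ rfl
        (fun x hx => hc x (List.drop_subset _ _ hx))
      obtain ⟨⟨hL1, hLk⟩, hLb, hLc⟩ := hL
      obtain ⟨⟨hR1, hRk⟩, hRb, hRc⟩ := hR
      set P := pvProd k (cnts.take (cnts.length / 2)) with hPdef
      set Q := pvProd k (cnts.drop (cnts.length / 2)) with hQdef
      have hprodsplit : prodP cnts = prodP (cnts.take (cnts.length / 2))
          * prodP (cnts.drop (cnts.length / 2)) := by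
        unfold prodP
        rw [← List.prod_append, ← List.map_append, List.take_append_drop]
      refine ⟨⟨by rw [pvMul_length]; omega, by rw [pvMul_length]; omega⟩, ?_, ?_⟩
      · intro e he
        unfold pvMul at he
        obtain ⟨j, _, hje⟩ := List.mem_map.mp he
        rw [← hje, pymod_eq]
        exact ⟨Int.emod_nonneg _ (by norm_num), Int.emod_lt_of_pos _ (by norm_num)⟩
      · intro j hj
        rw [hprodsplit, Polynomial.coeff_mul,
          Finset.Nat.sum_antidiagonal_eq_sum_range_succ_mk]
        by_cases hjm : j < min (P.length + Q.length - 1) k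
        · unfold toCoeff
          rw [pvMul_getD k P Q j hjm, cast_mod]
          push_cast
          apply Finset.sum_congr rfl
          intro i hi
          have hij : i < j + 1 := Finset.mem_range.mp hi
          rw [← hLc i (by omega), ← hRc (j - i) (by omega)]
          rfl
        · -- j is beyond the stored length: both the list entry and the coefficient are 0
          have hjlen : min (P.length + Q.length - 1) k ≤ j := by omega
          have hjPQ : P.length + Q.length - 1 ≤ j := by omega
          unfold toCoeff
          rw [List.getD_eq_default _ _ (by rw [pvMul_length]; omega)]
          rw [Finset.sum_eq_zero, Int.cast_zero]
          intro i hi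
          have hij : i < j + 1 := Finset.mem_range.mp hi
          by_cases hiP : i < P.length
          · have hQi : Q.length ≤ j - i := by omega
            rw [← hRc (j - i) (by omega)]
            unfold toCoeff
            rw [List.getD_eq_default _ _ hQi]
            simp
          · rw [← hLc i (by omega)]
            unfold toCoeff
            rw [List.getD_eq_default _ _ (by omega)]
            simp

-- the reference rows compute the coefficients of the running product
lemma pvRefFold (K : Nat) : ∀ (cnts : List Int) (g : List Int)
    (P : Polynomial (ZMod 1000000007)),
    (∀ c ∈ cnts, 1 ≤ c) → g.length = K → (∀ j < K, toCoeff g j = P.coeff j) →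
    ∀ j < K, toCoeff (cnts.foldl (pvRef K) g) j = (P * prodP cnts).coeff j := by
  intro cnts
  induction cnts with
  | nil =>
    intro g P _ _ hcoe j hj
    unfold prodP
    simpa using hcoe j hj
  | cons c t ih =>
    intro g P hc hg hcoe j hj
    rw [List.foldl_cons]
    have hc1 : 1 ≤ c := hc c (List.mem_cons_self)
    have hassoc : P * prodP (c :: t) = (P * fullOnes c) * prodP t := by
      unfold prodP
      rw [List.map_cons, List.prod_cons, mul_assoc]
    rw [hassoc]
    apply ih _ _ (fun x hx => hc x (List.mem_cons_of_mem _ hx)) (by simp [pvRef]) _ j hj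
    intro r hr
    unfold toCoeff pvRef
    rw [PySem.List.getD_map_range _ _ _ _ hr]
    show ((pvW g c.toNat r : Int) : ZMod 1000000007) = _
    unfold pvW
    rw [cast_mod]
    push_cast
    rw [Polynomial.coeff_mul, Finset.Nat.sum_antidiagonal_eq_sum_range_succ_mk]
    have hrhs : ∀ i ∈ Finset.range (r + 1),
        P.coeff i * (fullOnes c).coeff (r - i)
          = if r - c.toNat ≤ i then P.coeff i else 0 := by
      intro i hi
      have hir : i < r + 1 := Finset.mem_range.mp hi
      rw [coeff_fullOnes]
      by_cases h : r - c.toNat ≤ i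
      · rw [if_pos (by omega), if_pos h, mul_one]
      · rw [if_neg (by omega), if_neg h, mul_zero]
    rw [Finset.sum_congr rfl hrhs, ← Finset.sum_filter]
    have hset : (Finset.range (r + 1)).filter (fun i => r - c.toNat ≤ i)
        = Finset.Ico (r - c.toNat) (r + 1) := by
      ext x
      simp only [Finset.mem_filter, Finset.mem_range, Finset.mem_Ico]
      omega
    rw [hset]
    apply Finset.sum_congr rfl
    intro q hq
    have hqK : q < K := by
      have := Finset.mem_Ico.mp hq
      omega
    rw [← hcoe q hqK]
    rfl

-- two reduced residues with equal images in ZMod M are equal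
lemma reduced_eq (x y : Int) (hx : 0 ≤ x ∧ x < 1000000007) (hy : 0 ≤ y ∧ y < 1000000007)
    (h : (x : ZMod 1000000007) = (y : ZMod 1000000007)) : x = y := by
  have hmod := (ZMod.intCast_eq_intCast_iff' x y 1000000007).mp h
  have : ((1000000007 : ℕ) : ℤ) = 1000000007 := by norm_num
  rw [this] at hmod
  rwa [Int.emod_eq_of_lt hx.1 hx.2, Int.emod_eq_of_lt hy.1 hy.2] at hmod

-- the kernel equality: A's f[-1][-1] = (sum of B's product polynomial) % MOD
lemma pvKernelEq (K : Nat) (hK : 1 ≤ K) (cnts : List Int) (hc : ∀ c ∈ cnts, 1 ≤ c) :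
    (cnts.foldl (pvStepA K) (List.replicate K 1)).getD (K - 1) 0
      = PySem.Int.mod (pvProd K cnts).sum 1000000007 := by
  obtain ⟨hrow, hg, hinv⟩ := pvFoldInv K cnts _ _ hc (pvBaseInv K hK)
  have hx := hinv (K - 1) (by omega)
  rw [Nat.sub_add_cancel hK] at hx
  obtain ⟨⟨hp1, hpk⟩, hpb, hpc⟩ := pvProd_props K hK cnts.length cnts rfl hc
  -- base row 1::0… carries the coefficients of the polynomial 1
  have hbase : ∀ j < K, toCoeff (1 :: List.replicate (K - 1) (0 : Int)) j
      = (1 : Polynomial (ZMod 1000000007)).coeff j := by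
    intro j hj
    unfold toCoeff
    cases j with
    | zero => simp
    | succ m =>
      rw [Polynomial.coeff_one, if_neg (by omega)]
      show (((List.replicate (K - 1) (0 : Int)).getD m 0 : Int) : ZMod 1000000007) = 0
      rcases lt_or_ge m (K - 1) with h | h
      · rw [List.getD_replicate _ h]; simp
      · rw [List.getD_eq_default _ _ (by simpa using h)]; simp
  have hG := pvRefFold K cnts (1 :: List.replicate (K - 1) 0) 1 hc (by simp; omega) hbase
  -- cast of A's entry
  have hcastx : ((cnts.foldl (pvStepA K) (List.replicate K 1)).getD (K - 1) 0 : ZMod 1000000007)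
      = ∑ r ∈ Finset.range K, (prodP cnts).coeff r := by
    rw [hx, cast_mod]
    push_cast
    apply Finset.sum_congr rfl
    intro r hr
    have := hG r (Finset.mem_range.mp hr)
    rw [one_mul] at this
    exact this
  -- cast of B's reduced sum
  have hcasty : ((PySem.Int.mod (pvProd K cnts).sum 1000000007 : Int) : ZMod 1000000007)
      = ∑ r ∈ Finset.range K, (prodP cnts).coeff r := by
    rw [pymod_eq, cast_mod, list_sum_eq]
    push_cast
    have hzero : ∀ r ∈ Finset.range K, r ∉ Finset.range (pvProd K cnts).length →
        (((pvProd K cnts).getD r 0 : Int) : ZMod 1000000007) = 0 := by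
      intro r _ hrlen
      rw [List.getD_eq_default _ _ (by simpa using hrlen)]
      simp
    rw [Finset.sum_subset (Finset.range_subset_range.mpr hpk) hzero]
    apply Finset.sum_congr rfl
    intro r hr
    exact hpc r (Finset.mem_range.mp hr)
  apply reduced_eq
  · constructor
    · rw [hx]; exact Int.emod_nonneg _ (by norm_num)
    · rw [hx]; exact Int.emod_lt_of_pos _ (by norm_num)
  · rw [pymod_eq]
    exact ⟨Int.emod_nonneg _ (by norm_num), Int.emod_lt_of_pos _ (by norm_num)⟩
  · rw [hcastx, hcasty]

-- ===== VERDICT (by name: the statement is the Claim_ definition above) =====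
theorem possibleStringCount_2_spec : Claim_equal_possibleStringCount_2 := by
  intro word k _
  unfold Spec_possibleStringCount_2 possibleStringCount_2 possibleStringCount_2_alt
  simp only []
  split
  · rfl
  · have hc : ∀ c ∈ ((List.range word.toList.length).foldl (pvGroupStep word.toList)
        ([], 0, 1, k)).1, 1 ≤ c :=
      pvGroupInv word.toList _ _ (by simp) (by norm_num)
    generalize hst : (List.range word.toList.length).foldl (pvGroupStep word.toList)
        ([], 0, 1, k) = st at hc
    obtain ⟨cnts, cnt, ans, kk⟩ := st
    dsimp only at hc ⊢
    split
    · rfl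
    · rename_i hkk
      rw [pvKernelEq kk.toNat (by omega) cnts hc]
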